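-- pv_equiv track=rewrite | github.com/luisfv10/Codigos-de-Lula | Projetos-SI/5-Conserte-o-Clank.py | analises
-- ===== SOURCE A (Python) =====
-- def analises(sentenca, c, p_esquerda, p_direita):
--     if c == len(sentenca):
--         if p_esquerda == p_direita:
--             return 'Essa sentença está com os parênteses balanceados, HOORAY!'
--         elif p_esquerda > p_direita:
--             return 'A quantidade de parênteses \'(\' está maior que a de \')\', vamos descartá-la'
--         elif p_direita > p_esquerda:
--             return 'A quantidade de parênteses \')\' está maior que a de \'(\', vamos descartá-la'
--     else:
--         if c != len(sentenca) and sentenca[c] == '(':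
--             return analises(sentenca, c + 1, p_esquerda + 1, p_direita)
--         elif c != len(sentenca) and sentenca[c] == ')':
--             return analises(sentenca, c + 1, p_esquerda, p_direita + 1)
--         else:
--             return analises(sentenca, c + 1, p_esquerda, p_direita)
-- ===== SOURCE B (Python) =====
-- def analises(sentenca, c, p_esquerda, p_direita):
--     left, right = p_esquerda, p_direita
--     while c != len(sentenca):
--         ch = sentenca[c]
--         if ch == '(':
--             left += 1
--         elif ch == ')':
--             right += 1
--         c += 1
--     if left == right:
--         return 'Essa sentença está com os parênteses balanceados, HOORAY!'
--     elif left > right: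
--         return 'A quantidade de parênteses \'(\' está maior que a de \')\', vamos descartá-la'
--     else:
--         return 'A quantidade de parênteses \')\' está maior que a de \'(\', vamos descartá-la'
-- ===== Notes on version B (the rewrite author's own statement) =====
-- stated objective: simpler
-- what changed: Replaces the four-way tail recursion that threads counters through recursive calls with a flat counting loop followed by a single three-way comparison.
import Mathlib
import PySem

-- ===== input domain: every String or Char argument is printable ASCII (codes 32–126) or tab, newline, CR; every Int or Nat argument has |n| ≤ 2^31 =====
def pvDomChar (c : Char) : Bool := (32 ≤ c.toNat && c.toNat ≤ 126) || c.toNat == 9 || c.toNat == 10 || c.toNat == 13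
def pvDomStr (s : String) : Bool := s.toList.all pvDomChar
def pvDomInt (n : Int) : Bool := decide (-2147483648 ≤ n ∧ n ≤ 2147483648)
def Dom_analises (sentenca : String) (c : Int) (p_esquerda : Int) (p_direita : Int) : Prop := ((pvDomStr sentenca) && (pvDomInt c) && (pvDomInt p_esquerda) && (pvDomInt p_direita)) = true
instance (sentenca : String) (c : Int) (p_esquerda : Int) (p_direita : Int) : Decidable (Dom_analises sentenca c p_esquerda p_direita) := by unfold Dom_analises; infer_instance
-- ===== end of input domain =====

-- B replaces A's four-way tail recursion by one flat counting loop plus a final comparison (objective: simpler).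

def pvMsgEq : String := "Essa sentença está com os parênteses balanceados, HOORAY!"
def pvMsgL : String := "A quantidade de parênteses '(' está maior que a de ')', vamos descartá-la"
def pvMsgR : String := "A quantidade de parênteses ')' está maior que a de '(', vamos descartá-la"

-- used by both ports' decreasing_by
theorem pvGet_lt {s : String} {c : Int} {ch : Char} (h : PySem.Str.pyGet? s c = some ch) :
    c < PySem.Str.len s := by
  by_contra hlt
  have hnone : PySem.List.pyGet? s.toList c = none := by
    rw [PySem.List.pyGet?_eq_none_iff]
    intro hin
    exact hlt (by simpa [PySem.Str.len_eq] using hin.2)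
  simp [PySem.Str.pyGet?_eq, hnone] at h

-- ===== PORT A =====
def analises (sentenca : String) (c : Int) (p_esquerda : Int) (p_direita : Int) : String :=
  if c = PySem.Str.len sentenca then
    if p_esquerda = p_direita then pvMsgEq
    else if p_esquerda > p_direita then pvMsgL
    else pvMsgR
  else
    match h : PySem.Str.pyGet? sentenca c with
    | none => ""   -- Python raises IndexError here (outside Pre_)
    | some ch =>
      if ch = '(' then analises sentenca (c + 1) (p_esquerda + 1) p_direita
      else if ch = ')' then analises sentenca (c + 1) p_esquerda (p_direita + 1)
      else analises sentenca (c + 1) p_esquerda p_direita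
termination_by (PySem.Str.len sentenca - c).toNat
decreasing_by all_goals · have := pvGet_lt h; omega

-- ===== PORT B =====
-- B's while loop: accumulate (left, right) over the indices from c to len(sentenca)
def pvLoop (sentenca : String) (c left right : Int) : Int × Int :=
  if c = PySem.Str.len sentenca then (left, right)
  else
    match h : PySem.Str.pyGet? sentenca c with
    | none => (left, right)   -- Python raises IndexError here (outside Pre_)
    | some ch =>
      if ch = '(' then pvLoop sentenca (c + 1) (left + 1) right
      else if ch = ')' then pvLoop sentenca (c + 1) left (right + 1)
      else pvLoop sentenca (c + 1) left right
termination_by (PySem.Str.len sentenca - c).toNat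
decreasing_by all_goals · have := pvGet_lt h; omega

def analises_alt (sentenca : String) (c : Int) (p_esquerda : Int) (p_direita : Int) : String :=
  let st := pvLoop sentenca c p_esquerda p_direita
  if st.1 = st.2 then pvMsgEq
  else if st.1 > st.2 then pvMsgL
  else pvMsgR

-- ===== PRECONDITION & SPEC =====
-- A (and B alike) raises IndexError when c > len(sentenca) or c < -len(sentenca); Pre_ admits everything else.
def Pre_analises (sentenca : String) (c : Int) (p_esquerda : Int) (p_direita : Int) : Prop :=
  -(PySem.Str.len sentenca) ≤ c ∧ c ≤ PySem.Str.len sentenca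
instance (sentenca : String) (c : Int) (p_esquerda : Int) (p_direita : Int) : Decidable (Pre_analises sentenca c p_esquerda p_direita) := by unfold Pre_analises; infer_instance

def pvWitness_analises : String × Int × Int × Int := ("(a)()", 0, 0, 0)

def Spec_analises (sentenca : String) (c : Int) (p_esquerda : Int) (p_direita : Int) (out : String) : Prop := out = analises_alt sentenca c p_esquerda p_direita
instance (sentenca : String) (c : Int) (p_esquerda : Int) (p_direita : Int) (out : String) : Decidable (Spec_analises sentenca c p_esquerda p_direita out) := by unfold Spec_analises; infer_instance

-- ===== CLAIM (what is proved, stated in full; the proofs are below) =====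
def Claim_equal_analises : Prop := ∀ (sentenca : String) (c : Int) (p_esquerda : Int) (p_direita : Int), Dom_analises sentenca c p_esquerda p_direita → Pre_analises sentenca c p_esquerda p_direita → Spec_analises sentenca c p_esquerda p_direita (analises sentenca c p_esquerda p_direita)

-- ===== LEMMAS AND PROOFS =====

theorem pvGet_some {s : String} {c : Int} (h1 : -(PySem.Str.len s) ≤ c)
    (h2 : c < PySem.Str.len s) : ∃ ch, PySem.Str.pyGet? s c = some ch := by
  cases hg : PySem.Str.pyGet? s c with
  | some ch => exact ⟨ch, rfl⟩
  | none =>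
    have : PySem.List.pyGet? s.toList c = none := by simpa [PySem.Str.pyGet?_eq] using hg
    rw [PySem.List.pyGet?_eq_none_iff] at this
    exact absurd ⟨by simpa [PySem.Str.len_eq] using h1, by simpa [PySem.Str.len_eq] using h2⟩ this

theorem pvMain (s : String) : ∀ (n : Nat) (c pl pr : Int),
    (PySem.Str.len s - c).toNat = n → -(PySem.Str.len s) ≤ c → c ≤ PySem.Str.len s →
    analises s c pl pr = analises_alt s c pl pr := by
  intro n
  induction n with
  | zero =>
    intro c pl pr hn h1 h2
    have hc : c = PySem.Str.len s := by omega
    rw [analises, if_pos hc]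
    unfold analises_alt
    rw [pvLoop, if_pos hc]
  | succ m ih =>
    intro c pl pr hn h1 h2
    have hlt : c < PySem.Str.len s := by omega
    obtain ⟨ch, hch⟩ := pvGet_some h1 hlt
    have hrec : ∀ pl' pr', analises s (c + 1) pl' pr' = analises_alt s (c + 1) pl' pr' := by
      intro pl' pr'
      exact ih (c + 1) pl' pr' (by omega) (by omega) (by omega)
    rw [analises, if_neg (by omega), hch]
    have hstep : pvLoop s c pl pr =
        (if ch = '(' then pvLoop s (c + 1) (pl + 1) pr
         else if ch = ')' then pvLoop s (c + 1) pl (pr + 1)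
         else pvLoop s (c + 1) pl pr) := by
      rw [pvLoop, if_neg (by omega), hch]
    unfold analises_alt
    rw [hstep]
    by_cases hl : ch = '('
    · simp only [hl, reduceIte]
      have := hrec (pl + 1) pr
      unfold analises_alt at this
      exact this
    · by_cases hr : ch = ')'
      · simp only [hr, reduceIte]
        have := hrec pl (pr + 1)
        unfold analises_alt at this
        exact this
      · simp only [hl, hr, reduceIte]
        have := hrec pl pr
        unfold analises_alt at this
        exact this

-- ===== VERDICT (by name: the statement is the Claim_ definition above) =====
theorem analises_spec : Claim_equal_analises := by
  intro s c pl pr _ hpre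
  exact pvMain s (PySem.Str.len s - c).toNat c pl pr rfl hpre.1 hpre.2
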